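-- pv_equiv track=rewrite | github.com/makakoo/makakoo-os | plugins-core/lib-harvey-core/src/core/superbrain/chat_normalizer.py | normalize_plaintext
-- ===== SOURCE A (Python) =====
-- from typing import List, Dict, Optional, Any, Union
--
-- Transcript = List[Dict[str, str]]
--
-- def normalize_plaintext(raw: str) -> Transcript:
--     """
--     Plain text transcript — detect speaker changes by lines starting with
--     "Human:", "Assistant:", "User:", "Bot:", or blank-line-separated blocks.
--     """
--     result = []
--     lines = raw.splitlines()
--
--     current_role = "human"
--     buffer: List[str] = []
--
--     def flush():
--         if buffer:
--             result.append({"role": current_role, "content": " ".join(buffer), "ts": ""})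
--         return []
--
--     for line in lines:
--         stripped = line.strip()
--         lower = stripped.lower()
--
--         if lower.startswith("human:") or lower.startswith("user:"):
--             buffer = flush()
--             current_role = "human"
--             stripped = stripped.split(":", 1)[1].strip()
--         elif (
--             lower.startswith("assistant:")
--             or lower.startswith("bot:")
--             or lower.startswith("ai:")
--         ):
--             buffer = flush()
--             current_role = "assistant"
--             stripped = stripped.split(":", 1)[1].strip()
--         elif not stripped:
--             if buffer:
--                 buffer.append(" ")
--             continue
--
--         if stripped:
--             buffer.append(stripped)
--
--     flush()
--     return result
-- ===== SOURCE B (Python) =====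
-- def normalize_plaintext(raw: str):
--     """Two-pass: cut the lines into role segments at marker lines, then
--     render each segment's content independently."""
--     lines = raw.splitlines()
--     # pass 1: segment at role-marker lines; a marker's post-colon remainder
--     # becomes the first entry of its segment
--     segments = [("human", [])]
--     for line in lines:
--         stripped = line.strip()
--         lower = stripped.lower()
--         if lower.startswith("human:") or lower.startswith("user:"):
--             segments.append(("human", [stripped.split(":", 1)[1]]))
--         elif lower.startswith("assistant:") or lower.startswith("bot:") or lower.startswith("ai:"):
--             segments.append(("assistant", [stripped.split(":", 1)[1]]))
--         else:
--             segments[-1][1].append(line)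
--     # pass 2: fold each segment's entries into a token buffer and emit
--     result = []
--     for role, entries in segments:
--         buffer = []
--         for e in entries:
--             s = e.strip()
--             if s:
--                 buffer.append(s)
--             elif buffer:
--                 buffer.append(" ")
--         if buffer:
--             result.append({"role": role, "content": " ".join(buffer), "ts": ""})
--     return result
-- ===== Notes on version B (the rewrite author's own statement) =====
-- stated objective: alternative
-- what changed: A interleaves parsing and emission in one loop with a flush-on-the-fly closure and mutable role/buffer state; B makes two shaped passes: first cut the lines into role-tagged segments at marker lines, then independently fold each segment into a content buffer and emit it.
import Mathlib
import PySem

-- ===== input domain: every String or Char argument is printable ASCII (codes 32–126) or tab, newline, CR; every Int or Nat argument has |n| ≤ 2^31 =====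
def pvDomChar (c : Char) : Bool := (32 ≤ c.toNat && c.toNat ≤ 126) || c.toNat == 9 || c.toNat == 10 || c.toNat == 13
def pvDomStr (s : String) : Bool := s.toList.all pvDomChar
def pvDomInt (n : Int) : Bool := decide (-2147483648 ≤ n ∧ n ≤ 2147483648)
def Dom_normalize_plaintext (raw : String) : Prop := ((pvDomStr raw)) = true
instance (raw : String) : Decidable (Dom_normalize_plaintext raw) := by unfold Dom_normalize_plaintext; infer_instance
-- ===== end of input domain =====

-- B re-decomposes A's single flush-on-the-fly loop into two passes (segment at
-- marker lines, then render each segment); objective: alternative decomposition.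

-- stripped.split(":", 1)[1] — the [1] index always exists at its call sites
-- (the line starts with a marker containing ':'), so the defaults are unreachable.
def npAfterColon (s : String) : String :=
  ((PySem.Str.splitMax? s ":" 1).getD []).getD 1 ""

-- ===== PORT A =====
def npFlush (res : List (List (String × String))) (role : String) (buf : List String) :
    List (List (String × String)) :=
  if buf = [] then res
  else res ++ [[("role", role), ("content", PySem.Str.join " " buf), ("ts", "")]]

def npStepA (st : List (List (String × String)) × String × List String) (line : String) :
    List (List (String × String)) × String × List String :=
  let res := st.1
  let role := st.2.1
  let buf := st.2.2
  let stripped := PySem.Str.strip line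
  let lower := PySem.Str.lower stripped
  if PySem.Str.startswith lower "human:" || PySem.Str.startswith lower "user:" then
    let res := npFlush res role buf
    let stripped := PySem.Str.strip (npAfterColon stripped)
    (res, "human", if stripped ≠ "" then [stripped] else [])
  else if PySem.Str.startswith lower "assistant:" || PySem.Str.startswith lower "bot:" ||
      PySem.Str.startswith lower "ai:" then
    let res := npFlush res role buf
    let stripped := PySem.Str.strip (npAfterColon stripped)
    (res, "assistant", if stripped ≠ "" then [stripped] else [])
  else if stripped = "" then
    (res, role, if buf ≠ [] then buf ++ [" "] else buf)
  else
    (res, role, buf ++ [stripped])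

def normalize_plaintext (raw : String) : List (List (String × String)) :=
  let st := (PySem.Str.splitlines raw).foldl npStepA ([], "human", [])
  npFlush st.1 st.2.1 st.2.2

-- ===== PORT B =====
-- pass 1: classify a line; some (role, remainder) for a marker line
def npClassify (line : String) : Option (String × String) :=
  let stripped := PySem.Str.strip line
  let lower := PySem.Str.lower stripped
  if PySem.Str.startswith lower "human:" || PySem.Str.startswith lower "user:" then
    some ("human", npAfterColon stripped)
  else if PySem.Str.startswith lower "assistant:" || PySem.Str.startswith lower "bot:" ||
      PySem.Str.startswith lower "ai:" then
    some ("assistant", npAfterColon stripped)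
  else none

def npCut (role : String) (cur : List String) : List String → List (String × List String)
  | [] => [(role, cur)]
  | l :: ls =>
    match npClassify l with
    | some (r, rem) => (role, cur) :: npCut r [rem] ls
    | none => npCut role (cur ++ [l]) ls

-- pass 2: fold a segment's entries into a token buffer
def npTok (buf : List String) (e : String) : List String :=
  let s := PySem.Str.strip e
  if s ≠ "" then buf ++ [s]
  else if buf ≠ [] then buf ++ [" "]
  else buf

def npRender (seg : String × List String) : List (List (String × String)) :=
  let buf := seg.2.foldl npTok []
  if buf = [] then []
  else [[("role", seg.1), ("content", PySem.Str.join " " buf), ("ts", "")]]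

def normalize_plaintext_alt (raw : String) : List (List (String × String)) :=
  (npCut "human" [] (PySem.Str.splitlines raw)).flatMap npRender

-- ===== PRECONDITION & SPEC =====
def Spec_normalize_plaintext (raw : String) (out : List (List (String × String))) : Prop := out = normalize_plaintext_alt raw
instance (raw : String) (out : List (List (String × String))) : Decidable (Spec_normalize_plaintext raw out) := by unfold Spec_normalize_plaintext; infer_instance

-- ===== CLAIM (what is proved, stated in full; the proofs are below) =====
def Claim_equal_normalize_plaintext : Prop := ∀ (raw : String), Dom_normalize_plaintext raw → Spec_normalize_plaintext raw (normalize_plaintext raw)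


-- ===== LEMMAS AND PROOFS =====

theorem npTok_append (cur : List String) (l : String) :
    (cur ++ [l]).foldl npTok [] = npTok (cur.foldl npTok []) l := by
  simp [List.foldl_append]

theorem npRender_eq_flush (role : String) (cur : List String) :
    npRender (role, cur) = npFlush [] role (cur.foldl npTok []) := by
  simp only [npRender, npFlush]
  split <;> simp_all

theorem npFlush_eq_append (res : List (List (String × String))) (role : String)
    (buf : List String) : npFlush res role buf = res ++ npFlush [] role buf := by
  simp only [npFlush]
  split <;> simp

theorem npStepA_human (l : String) (res : List (List (String × String))) (role : String)
    (buf : List String)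
    (h1 : (PySem.Str.startswith (PySem.Str.lower (PySem.Str.strip l)) "human:" ||
        PySem.Str.startswith (PySem.Str.lower (PySem.Str.strip l)) "user:") = true) :
    npStepA (res, role, buf) l
      = (npFlush res role buf, "human", [npAfterColon (PySem.Str.strip l)].foldl npTok []) := by
  simp only [npStepA, h1, if_true, List.foldl_cons, List.foldl_nil, npTok]
  split <;> simp_all

theorem npStepA_assist (l : String) (res : List (List (String × String))) (role : String)
    (buf : List String)
    (h1 : ¬ (PySem.Str.startswith (PySem.Str.lower (PySem.Str.strip l)) "human:" ||
        PySem.Str.startswith (PySem.Str.lower (PySem.Str.strip l)) "user:") = true)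
    (h2 : (PySem.Str.startswith (PySem.Str.lower (PySem.Str.strip l)) "assistant:" ||
        PySem.Str.startswith (PySem.Str.lower (PySem.Str.strip l)) "bot:" ||
        PySem.Str.startswith (PySem.Str.lower (PySem.Str.strip l)) "ai:") = true) :
    npStepA (res, role, buf) l
      = (npFlush res role buf, "assistant", [npAfterColon (PySem.Str.strip l)].foldl npTok []) := by
  simp only [npStepA, h1, h2, if_true, if_false, Bool.false_eq_true, List.foldl_cons,
    List.foldl_nil, npTok]
  split <;> simp_all

theorem npStepA_plain (l : String) (res : List (List (String × String))) (role : String)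
    (cur : List String)
    (h1 : ¬ (PySem.Str.startswith (PySem.Str.lower (PySem.Str.strip l)) "human:" ||
        PySem.Str.startswith (PySem.Str.lower (PySem.Str.strip l)) "user:") = true)
    (h2 : ¬ (PySem.Str.startswith (PySem.Str.lower (PySem.Str.strip l)) "assistant:" ||
        PySem.Str.startswith (PySem.Str.lower (PySem.Str.strip l)) "bot:" ||
        PySem.Str.startswith (PySem.Str.lower (PySem.Str.strip l)) "ai:") = true) :
    npStepA (res, role, cur.foldl npTok []) l
      = (res, role, (cur ++ [l]).foldl npTok []) := by
  rw [npTok_append]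
  simp only [npStepA, h1, h2, if_false, Bool.false_eq_true, npTok]
  by_cases h3 : PySem.Str.strip l = "" <;> simp [h3]

theorem npCut_human (l : String) (ls : List String) (role : String) (cur : List String)
    (h1 : (PySem.Str.startswith (PySem.Str.lower (PySem.Str.strip l)) "human:" ||
        PySem.Str.startswith (PySem.Str.lower (PySem.Str.strip l)) "user:") = true) :
    npCut role cur (l :: ls)
      = (role, cur) :: npCut "human" [npAfterColon (PySem.Str.strip l)] ls := by
  simp only [npCut, npClassify, h1, if_true]

theorem npCut_assist (l : String) (ls : List String) (role : String) (cur : List String)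
    (h1 : ¬ (PySem.Str.startswith (PySem.Str.lower (PySem.Str.strip l)) "human:" ||
        PySem.Str.startswith (PySem.Str.lower (PySem.Str.strip l)) "user:") = true)
    (h2 : (PySem.Str.startswith (PySem.Str.lower (PySem.Str.strip l)) "assistant:" ||
        PySem.Str.startswith (PySem.Str.lower (PySem.Str.strip l)) "bot:" ||
        PySem.Str.startswith (PySem.Str.lower (PySem.Str.strip l)) "ai:") = true) :
    npCut role cur (l :: ls)
      = (role, cur) :: npCut "assistant" [npAfterColon (PySem.Str.strip l)] ls := by
  simp only [npCut, npClassify, h1, h2, if_true, if_false, Bool.false_eq_true]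

theorem npCut_plain (l : String) (ls : List String) (role : String) (cur : List String)
    (h1 : ¬ (PySem.Str.startswith (PySem.Str.lower (PySem.Str.strip l)) "human:" ||
        PySem.Str.startswith (PySem.Str.lower (PySem.Str.strip l)) "user:") = true)
    (h2 : ¬ (PySem.Str.startswith (PySem.Str.lower (PySem.Str.strip l)) "assistant:" ||
        PySem.Str.startswith (PySem.Str.lower (PySem.Str.strip l)) "bot:" ||
        PySem.Str.startswith (PySem.Str.lower (PySem.Str.strip l)) "ai:") = true) :
    npCut role cur (l :: ls) = npCut role (cur ++ [l]) ls := by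
  simp only [npCut, npClassify, h1, h2, if_false, Bool.false_eq_true]

-- A's loop, started with buffer = fold of `cur`, computes `res` ++ the rendering of the cut
theorem np_loop_eq (lines : List String) :
    ∀ (res : List (List (String × String))) (role : String) (cur : List String),
    npFlush (lines.foldl npStepA (res, role, cur.foldl npTok [])).1
        (lines.foldl npStepA (res, role, cur.foldl npTok [])).2.1
        (lines.foldl npStepA (res, role, cur.foldl npTok [])).2.2
      = res ++ (npCut role cur lines).flatMap npRender := by
  induction lines with
  | nil =>
    intro res role cur
    simp only [List.foldl_nil, npCut, List.flatMap_cons, List.flatMap_nil, List.append_nil,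
      npRender_eq_flush]
    exact npFlush_eq_append res role (cur.foldl npTok [])
  | cons l ls ih =>
    intro res role cur
    simp only [List.foldl_cons]
    by_cases h1 : (PySem.Str.startswith (PySem.Str.lower (PySem.Str.strip l)) "human:" ||
        PySem.Str.startswith (PySem.Str.lower (PySem.Str.strip l)) "user:") = true
    · rw [npStepA_human l res role _ h1, ih, npCut_human l ls role cur h1,
        List.flatMap_cons, npRender_eq_flush, npFlush_eq_append, List.append_assoc]
    · by_cases h2 : (PySem.Str.startswith (PySem.Str.lower (PySem.Str.strip l)) "assistant:" ||
          PySem.Str.startswith (PySem.Str.lower (PySem.Str.strip l)) "bot:" ||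
          PySem.Str.startswith (PySem.Str.lower (PySem.Str.strip l)) "ai:") = true
      · rw [npStepA_assist l res role _ h1 h2, ih, npCut_assist l ls role cur h1 h2,
          List.flatMap_cons, npRender_eq_flush, npFlush_eq_append, List.append_assoc]
      · rw [npStepA_plain l res role cur h1 h2, ih, npCut_plain l ls role cur h1 h2]

-- ===== VERDICT (by name: the statement is the Claim_ definition above) =====
theorem normalize_plaintext_spec : Claim_equal_normalize_plaintext := by
  intro raw _
  unfold Spec_normalize_plaintext normalize_plaintext normalize_plaintext_alt
  have h := np_loop_eq (PySem.Str.splitlines raw) [] "human" []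
  simpa using h
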